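-- pv_equiv track=rewrite | github.com/VoTueNam/HackerRank-python-solution | Python/Count day legal.py | maxCost
-- ===== SOURCE A (Python) =====
-- def maxCost(cost, labels, dailyCount):
--     n = 0
--     maxx = 0
--     countday = 0
--     illegal = 0
--     for i in range(len(cost)):
--         n += cost[i]
--         if maxx < n:
--             maxx = n
--         if labels[i] =="legal":
--             countday +=1
--         # if countday == 0:
--         #     n = 0
--         if countday == dailyCount:
--             countday = 0
--             n = 0
--             illegal = 1
--     if illegal == 0:
--         return 0
--     else:
--         return maxx
-- ===== SOURCE B (Python) =====
-- def seg_best(seg):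
--     s = 0
--     m = 0
--     for x in seg:
--         s += x
--         m = max(m, s)
--     return m
--
--
-- def maxCost(cost, labels, dailyCount):
--     # Phase 1: split the costs into segments, closing a segment whenever the
--     # legal-day counter reaches dailyCount (the reset points of the task).
--     segments = []
--     current = []
--     c = 0
--     for x, lab in zip(cost, labels):
--         current.append(x)
--         if lab == "legal":
--             c += 1
--         if c == dailyCount:
--             segments.append(current)
--             current = []
--             c = 0
--     if not segments:
--         return 0
--     # Phase 2: the answer is the largest running prefix sum over all segments
--     # (including the trailing partial one), clamped below at 0.
--     best = 0
--     for seg in segments + [current]: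
--         best = max(best, seg_best(seg))
--     return best
-- ===== Notes on version B (the rewrite author's own statement) =====
-- stated objective: alternative
-- what changed: A fuses running sum, running max, legal counter and flag into one loop; B first splits the costs into segments at the legal-counter reset points and then folds the per-segment prefix-sum maxima (clamped at 0) over all segments including the trailing partial one.
import Mathlib
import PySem

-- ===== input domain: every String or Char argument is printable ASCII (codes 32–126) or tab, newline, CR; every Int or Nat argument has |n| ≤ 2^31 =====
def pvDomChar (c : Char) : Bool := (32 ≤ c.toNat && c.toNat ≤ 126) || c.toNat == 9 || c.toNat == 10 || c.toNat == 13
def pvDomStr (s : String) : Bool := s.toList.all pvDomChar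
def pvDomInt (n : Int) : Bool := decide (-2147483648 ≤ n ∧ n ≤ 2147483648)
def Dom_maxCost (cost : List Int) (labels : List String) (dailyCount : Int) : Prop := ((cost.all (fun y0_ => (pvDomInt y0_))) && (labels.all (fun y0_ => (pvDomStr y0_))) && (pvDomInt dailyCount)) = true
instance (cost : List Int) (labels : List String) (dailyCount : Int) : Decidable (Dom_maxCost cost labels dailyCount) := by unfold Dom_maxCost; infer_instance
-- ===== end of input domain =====

-- B replaces A's fused single loop (running sum/max/counter/flag) by a two-phase
-- decomposition: split the costs into segments at the legal-counter reset points,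
-- then fold the per-segment prefix-sum maxima; same O(n) cost (objective: alternative).

-- ===== PORT A =====
def maxCost (cost : List Int) (labels : List String) (dailyCount : Int) : Int :=
  let final := (PySem.List.pyRange 0 (cost.length : Int) 1).foldl
    (fun (st : Int × Int × Int × Int) i =>
      let n := st.1 + PySem.List.pyGetD cost i 0
      let maxx := if st.2.1 < n then n else st.2.1
      let countday := if PySem.List.pyGetD labels i "" = "legal" then st.2.2.1 + 1 else st.2.2.1
      if countday = dailyCount then ((0 : Int), maxx, (0 : Int), (1 : Int))
      else (n, maxx, countday, st.2.2.2))
    ((0 : Int), (0 : Int), (0 : Int), (0 : Int))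
  if final.2.2.2 = 0 then 0 else final.2.1

-- ===== PORT B =====
-- Source B's seg_best: largest running prefix sum of a segment, clamped at 0
def segBest (seg : List Int) : Int :=
  (seg.foldl (fun (sm : Int × Int) x => (sm.1 + x, max sm.2 (sm.1 + x))) ((0 : Int), (0 : Int))).2

def maxCost_alt (cost : List Int) (labels : List String) (dailyCount : Int) : Int :=
  -- phase 1: split costs into segments closed at legal-counter reset points
  let st := (cost.zip labels).foldl
    (fun (st : List (List Int) × List Int × Int) (p : Int × String) =>
      let cur := st.2.1 ++ [p.1]
      let c := if p.2 = "legal" then st.2.2 + 1 else st.2.2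
      if c = dailyCount then (st.1 ++ [cur], ([] : List Int), (0 : Int))
      else (st.1, cur, c))
    (([] : List (List Int)), ([] : List Int), (0 : Int))
  if st.1 = [] then 0
  else
    -- phase 2: fold the per-segment prefix maxima (trailing partial segment included)
    (st.1 ++ [st.2.1]).foldl (fun b seg => max b (segBest seg)) 0

-- ===== PRECONDITION & SPEC =====
-- Pre_ excludes only the inputs where labels is shorter than cost: there A raises IndexError.
def Pre_maxCost (cost : List Int) (labels : List String) (dailyCount : Int) : Prop :=
  cost.length ≤ labels.length
instance (cost : List Int) (labels : List String) (dailyCount : Int) : Decidable (Pre_maxCost cost labels dailyCount) := by unfold Pre_maxCost; infer_instance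
def pvWitness_maxCost : List Int × List String × Int := ([1, -2, 3], ["legal", "x", "legal"], 1)

def Spec_maxCost (cost : List Int) (labels : List String) (dailyCount : Int) (out : Int) : Prop := out = maxCost_alt cost labels dailyCount
instance (cost : List Int) (labels : List String) (dailyCount : Int) (out : Int) : Decidable (Spec_maxCost cost labels dailyCount out) := by unfold Spec_maxCost; infer_instance

-- ===== CLAIM (what is proved, stated in full; the proofs are below) =====
def Claim_equal_maxCost : Prop := ∀ (cost : List Int) (labels : List String) (dailyCount : Int), Dom_maxCost cost labels dailyCount → Pre_maxCost cost labels dailyCount → Spec_maxCost cost labels dailyCount (maxCost cost labels dailyCount)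
-- ===== LEMMAS AND PROOFS =====

-- common reference recursion over (cost, label) pairs
def go (d : Int) : List (Int × String) → Int → Int → Int → Bool → Int
  | [], _, _, m, hit => if hit then m else 0
  | (x, lab) :: rest, c, n, m, hit =>
      let n' := n + x
      let m' := if m < n' then n' else m
      let c' := if lab = "legal" then c + 1 else c
      if c' = d then go d rest 0 0 m' true else go d rest c' n' m' hit

-- A's fused loop, expressed over pairs
def stepA (d : Int) (st : Int × Int × Int × Int) (x : Int) (lab : String) : Int × Int × Int × Int :=
  let n := st.1 + x
  let maxx := if st.2.1 < n then n else st.2.1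
  let countday := if lab = "legal" then st.2.2.1 + 1 else st.2.2.1
  if countday = d then ((0 : Int), maxx, (0 : Int), (1 : Int))
  else (n, maxx, countday, st.2.2.2)

theorem foldA_go (d : Int) (pairs : List (Int × String)) :
    ∀ (n m c : Int) (hit : Bool),
    (let f := pairs.foldl (fun st (p : Int × String) => stepA d st p.1 p.2) (n, m, c, if hit then (1 : Int) else 0);
     if f.2.2.2 = 0 then 0 else f.2.1) = go d pairs c n m hit := by
  induction pairs with
  | nil => intro n m c hit; cases hit <;> simp [go]
  | cons p rest ih =>
      intro n m c hit
      obtain ⟨x, lab⟩ := p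
      simp only [List.foldl_cons, stepA, go]
      by_cases h : (if lab = "legal" then c + 1 else c) = d
      · simp only [h, if_pos]
        have := ih 0 (if m < n + x then n + x else m) 0 true
        simpa using this
      · simp only [if_neg h]
        exact ih (n + x) (if m < n + x then n + x else m) (if lab = "legal" then c + 1 else c) hit

-- index loop over two lists = fold over their zip (labels long enough)
theorem range_fold_zip {σ : Type} (f : σ → Int → String → σ) :
    ∀ (cost : List Int) (labels : List String), cost.length ≤ labels.length → ∀ (st : σ),
    (List.range cost.length).foldl (fun st k => f st (cost.getD k 0) (labels.getD k "")) st
      = (cost.zip labels).foldl (fun st p => f st p.1 p.2) st := by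
  intro cost
  induction cost with
  | nil => intro labels _ st; simp
  | cons x rest ih =>
      intro labels hlen st
      cases labels with
      | nil => simp at hlen
      | cons lab ls =>
          simp only [List.length_cons, List.range_succ_eq_map, List.foldl_cons, List.foldl_map,
            List.zip_cons_cons, List.getD_cons_zero, List.getD_cons_succ]
          exact ih ls (by simpa using hlen) (f st x lab)

theorem foldA_go0 (d : Int) (pairs : List (Int × String)) :
    (let f := pairs.foldl (fun st (p : Int × String) => stepA d st p.1 p.2)
        ((0 : Int), (0 : Int), (0 : Int), (0 : Int));
     if f.2.2.2 = 0 then 0 else f.2.1) = go d pairs 0 0 0 false :=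
  foldA_go d pairs 0 0 0 false

theorem maxCost_eq_go (cost : List Int) (labels : List String) (d : Int)
    (h : cost.length ≤ labels.length) :
    maxCost cost labels d = go d (cost.zip labels) 0 0 0 false := by
  have key : (PySem.List.pyRange 0 (cost.length : Int) 1).foldl
      (fun (st : Int × Int × Int × Int) i =>
        let n := st.1 + PySem.List.pyGetD cost i 0
        let maxx := if st.2.1 < n then n else st.2.1
        let countday := if PySem.List.pyGetD labels i "" = "legal" then st.2.2.1 + 1 else st.2.2.1
        if countday = d then ((0 : Int), maxx, (0 : Int), (1 : Int))
        else (n, maxx, countday, st.2.2.2))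
      ((0 : Int), (0 : Int), (0 : Int), (0 : Int))
      = (cost.zip labels).foldl (fun st (p : Int × String) => stepA d st p.1 p.2)
        ((0 : Int), (0 : Int), (0 : Int), (0 : Int)) := by
    rw [PySem.List.pyRange_zero_nat cost.length, List.foldl_map,
      ← range_fold_zip (fun st x lab => stepA d st x lab) cost labels h]
    congr 1
    funext st k
    simp [stepA, PySem.List.pyGetD_natCast]
  unfold maxCost
  rw [key]
  exact foldA_go0 d (cost.zip labels)

-- segBest facts
theorem segFold_fst (seg : List Int) : ∀ (s m : Int),
    (seg.foldl (fun (sm : Int × Int) x => (sm.1 + x, max sm.2 (sm.1 + x))) (s, m)).1 = s + seg.sum := by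
  induction seg with
  | nil => intro s m; simp
  | cons x rest ih => intro s m; simp only [List.foldl_cons, List.sum_cons]; rw [ih]; ring

theorem segBest_append (cur : List Int) (x : Int) :
    segBest (cur ++ [x]) = max (segBest cur) (cur.sum + x) := by
  unfold segBest
  rw [List.foldl_append]
  simp only [List.foldl_cons, List.foldl_nil]
  rw [segFold_fst cur 0 0]
  simp

-- bestOf = Source B's phase-2 fold
def bestOf (ls : List (List Int)) : Int := ls.foldl (fun b seg => max b (segBest seg)) 0

theorem bestOf_fold_le (ls : List (List Int)) : ∀ (b : Int),
    b ≤ ls.foldl (fun b seg => max b (segBest seg)) b := by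
  induction ls with
  | nil => intro b; simp
  | cons seg rest ih =>
      intro b
      simp only [List.foldl_cons]
      exact le_trans (le_max_left _ _) (ih (max b (segBest seg)))

theorem bestOf_nonneg (ls : List (List Int)) : 0 ≤ bestOf ls := bestOf_fold_le ls 0

theorem bestOf_append (ls : List (List Int)) (seg : List Int) :
    bestOf (ls ++ [seg]) = max (bestOf ls) (segBest seg) := by
  unfold bestOf; rw [List.foldl_append]; simp

theorem maxLem (B S n' : Int) :
    max B (max S n') = if max B S < n' then n' else max B S := by
  simp only [max_def]; split_ifs <;> omega

theorem foldB_go (d : Int) (pairs : List (Int × String)) :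
    ∀ (segs : List (List Int)) (cur : List Int) (c : Int),
    (let st := pairs.foldl
        (fun (st : List (List Int) × List Int × Int) (p : Int × String) =>
          let cur := st.2.1 ++ [p.1]
          let c := if p.2 = "legal" then st.2.2 + 1 else st.2.2
          if c = d then (st.1 ++ [cur], ([] : List Int), (0 : Int))
          else (st.1, cur, c)) (segs, cur, c);
     if st.1 = [] then 0 else (st.1 ++ [st.2.1]).foldl (fun b seg => max b (segBest seg)) 0)
      = go d pairs c cur.sum (max (bestOf segs) (segBest cur)) (!segs.isEmpty) := by
  induction pairs with
  | nil =>
      intro segs cur c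
      cases segs with
      | nil => simp [go]
      | cons s ss =>
          simp only [go, List.isEmpty_cons, Bool.not_false, List.foldl_nil]
          rw [if_neg (by simp), if_pos (by trivial)]
          exact bestOf_append (s :: ss) cur
  | cons p rest ih =>
      intro segs cur c
      obtain ⟨x, lab⟩ := p
      simp only [List.foldl_cons, go]
      by_cases h : (if lab = "legal" then c + 1 else c) = d
      · simp only [h, if_pos]
        have hmax : max (bestOf (segs ++ [cur ++ [x]])) (segBest ([] : List Int))
            = (if max (bestOf segs) (segBest cur) < cur.sum + x then cur.sum + x
               else max (bestOf segs) (segBest cur)) := by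
          rw [bestOf_append, segBest_append,
            show segBest ([] : List Int) = 0 from rfl,
            max_eq_left (le_trans (bestOf_nonneg segs) (le_max_left _ _)), maxLem]
        have := ih (segs ++ [cur ++ [x]]) [] 0
        rw [show ([] : List Int).sum = 0 from rfl, hmax,
          show (!(segs ++ [cur ++ [x]]).isEmpty) = true from by simp] at this
        exact this
      · simp only [if_neg h]
        have hmax : max (bestOf segs) (segBest (cur ++ [x]))
            = (if max (bestOf segs) (segBest cur) < cur.sum + x then cur.sum + x
               else max (bestOf segs) (segBest cur)) := by
          rw [segBest_append, maxLem]
        have := ih segs (cur ++ [x]) (if lab = "legal" then c + 1 else c)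
        rw [show (cur ++ [x]).sum = cur.sum + x from by simp, hmax] at this
        exact this

theorem maxCost_alt_eq_go (cost : List Int) (labels : List String) (d : Int) :
    maxCost_alt cost labels d = go d (cost.zip labels) 0 0 0 false := by
  unfold maxCost_alt
  have := foldB_go d (cost.zip labels) [] [] 0
  simpa [bestOf, segBest] using this

-- ===== VERDICT (by name: the statement is the Claim_ definition above) =====
theorem maxCost_spec : Claim_equal_maxCost := by
  intro cost labels dailyCount _ hpre
  unfold Spec_maxCost
  rw [maxCost_eq_go cost labels dailyCount hpre, maxCost_alt_eq_go]
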